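-- pv_equiv track=rewrite | github.com/thiagopelizoni/ProjectEuler | src/problem_090.py | can_display
-- ===== SOURCE A (Python) =====
-- square_numbers = ['01', '04', '09', '16', '25', '36', '49', '64', '81']
--
-- def can_display(c1, c2):
--     for square in square_numbers:
--         if not ((square[0] in c1 and square[1] in c2) or (square[0] in c2 and square[1] in c1)):
--             if '6' in square or '9' in square:
--                 square = square.replace('6', '9') if '6' in square else square.replace('9', '6')
--                 if not ((square[0] in c1 and square[1] in c2) or (square[0] in c2 and square[1] in c1)):
--                     return False
--             else:
--                 return False
--     return True
-- ===== SOURCE B (Python) =====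
-- square_numbers = ['01', '04', '09', '16', '25', '36', '49', '64', '81']
--
-- def _augment(face):
--     aug = list(face)
--     if '6' in face:
--         aug.append('9')
--     if '9' in face:
--         aug.append('6')
--     return aug
--
-- def can_display(c1, c2):
--     a1 = _augment(c1)
--     a2 = _augment(c2)
--     return all((s[0] in a1 and s[1] in a2) or (s[0] in a2 and s[1] in a1)
--                for s in square_numbers)
-- ===== Notes on version B (the rewrite author's own statement) =====
-- stated objective: simpler
-- what changed: B precomputes 6/9-augmented copies of both faces once and then does one uniform membership pass over the nine squares with all(), removing A's inline replace-the-digit-and-recheck branch from the loop body.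
import Mathlib
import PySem

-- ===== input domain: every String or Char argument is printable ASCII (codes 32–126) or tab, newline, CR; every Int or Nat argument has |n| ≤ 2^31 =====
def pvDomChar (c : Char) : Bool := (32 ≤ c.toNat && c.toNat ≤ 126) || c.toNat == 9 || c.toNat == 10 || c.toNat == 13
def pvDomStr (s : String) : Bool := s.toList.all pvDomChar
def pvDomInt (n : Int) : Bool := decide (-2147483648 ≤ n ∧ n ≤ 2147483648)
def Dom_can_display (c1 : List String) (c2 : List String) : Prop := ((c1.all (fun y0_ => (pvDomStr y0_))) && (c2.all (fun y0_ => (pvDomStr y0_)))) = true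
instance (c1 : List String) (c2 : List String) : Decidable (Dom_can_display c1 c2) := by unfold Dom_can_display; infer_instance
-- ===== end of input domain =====

-- B replaces A's inline "replace 6<->9 and recheck" branch by precomputed augmented faces
-- and one uniform membership pass over the squares (objective: simpler).

-- ===== PORT A =====
-- module constant square_numbers
def squareNumbers : List String := ["01", "04", "09", "16", "25", "36", "49", "64", "81"]

-- square[i] as a 1-char string (the "" arm is unreachable: every square is a 2-char literal)
def sqAt (s : String) (i : Int) : String :=
  match PySem.Str.pyGet? s i with
  | some c => String.ofList [c]
  | none => ""

-- (square[0] in c1 and square[1] in c2) or (square[0] in c2 and square[1] in c1)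
def pairCheck (sq : String) (c1 c2 : List String) : Bool :=
  (c1.contains (sqAt sq 0) && c2.contains (sqAt sq 1)) ||
  (c2.contains (sqAt sq 0) && c1.contains (sqAt sq 1))

-- A's for-loop; the early 'return False' is the Bool false
def canDisplayLoop (c1 c2 : List String) : List String → Bool
  | [] => true
  | sq :: rest =>
    if pairCheck sq c1 c2 then canDisplayLoop c1 c2 rest
    else if PySem.Str.isIn "6" sq || PySem.Str.isIn "9" sq then
      let sq' := if PySem.Str.isIn "6" sq then PySem.Str.replace sq "6" "9"
                 else PySem.Str.replace sq "9" "6"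
      if pairCheck sq' c1 c2 then canDisplayLoop c1 c2 rest else false
    else false

def can_display (c1 : List String) (c2 : List String) : Bool :=
  canDisplayLoop c1 c2 squareNumbers

-- ===== PORT B =====
-- _augment(face): a copy of face, plus "9" if "6" is present, plus "6" if "9" is present
def augFace (face : List String) : List String :=
  let aug := face
  let aug := if face.contains "6" then aug ++ ["9"] else aug
  let aug := if face.contains "9" then aug ++ ["6"] else aug
  aug

def can_display_alt (c1 : List String) (c2 : List String) : Bool :=
  let a1 := augFace c1
  let a2 := augFace c2
  squareNumbers.all (fun s => pairCheck s a1 a2)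

-- ===== PRECONDITION & SPEC =====
def Spec_can_display (c1 : List String) (c2 : List String) (out : Bool) : Prop := out = can_display_alt c1 c2
instance (c1 : List String) (c2 : List String) (out : Bool) : Decidable (Spec_can_display c1 c2 out) := by unfold Spec_can_display; infer_instance

-- ===== CLAIM (what is proved, stated in full; the proofs are below) =====
def Claim_equal_can_display : Prop := ∀ (c1 : List String) (c2 : List String), Dom_can_display c1 c2 → Spec_can_display c1 c2 (can_display c1 c2)

-- ===== LEMMAS AND PROOFS =====

lemma bool_if_chain : ∀ (p c q r : Bool),
    (if p then r else if c then (if q then r else false) else false) = ((p || (c && q)) && r) := by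
  decide

-- one iteration of A's loop, as "this square is displayable && rest"
def stepA (sq : String) (c1 c2 : List String) : Bool :=
  pairCheck sq c1 c2 || ((PySem.Str.isIn "6" sq || PySem.Str.isIn "9" sq) &&
    pairCheck (if PySem.Str.isIn "6" sq then PySem.Str.replace sq "6" "9"
               else PySem.Str.replace sq "9" "6") c1 c2)

lemma loop_cons (c1 c2 : List String) (sq : String) (rest : List String) :
    canDisplayLoop c1 c2 (sq :: rest) = (stepA sq c1 c2 && canDisplayLoop c1 c2 rest) := by
  show (if _ then _ else _) = _
  exact bool_if_chain _ _ _ _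

lemma aug_contains (face : List String) (d : String) :
    (augFace face).contains d =
      (face.contains d || (face.contains "6" && (d == "9")) || (face.contains "9" && (d == "6"))) := by
  unfold augFace
  cases h6 : face.contains "6" <;> cases h9 : face.contains "9" <;>
    simp [List.contains_append, Bool.or_comm, Bool.or_assoc, Bool.beq_eq_decide_eq]

lemma step01 (c1 c2 : List String) :
    stepA "01" c1 c2 = pairCheck "01" (augFace c1) (augFace c2) := by
  have s0 : sqAt "01" 0 = "0" := by decide
  have s1 : sqAt "01" 1 = "1" := by decide
  have i6 : PySem.Str.isIn "6" "01" = false := by decide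
  have i9 : PySem.Str.isIn "9" "01" = false := by decide
  simp only [stepA, pairCheck, s0, s1, i6, i9, aug_contains]
  simp

lemma step04 (c1 c2 : List String) :
    stepA "04" c1 c2 = pairCheck "04" (augFace c1) (augFace c2) := by
  have s0 : sqAt "04" 0 = "0" := by decide
  have s1 : sqAt "04" 1 = "4" := by decide
  have i6 : PySem.Str.isIn "6" "04" = false := by decide
  have i9 : PySem.Str.isIn "9" "04" = false := by decide
  simp only [stepA, pairCheck, s0, s1, i6, i9, aug_contains]
  simp

lemma step09 (c1 c2 : List String) :
    stepA "09" c1 c2 = pairCheck "09" (augFace c1) (augFace c2) := by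
  have s0 : sqAt "09" 0 = "0" := by decide
  have s1 : sqAt "09" 1 = "9" := by decide
  have i6 : PySem.Str.isIn "6" "09" = false := by decide
  have i9 : PySem.Str.isIn "9" "09" = true := by decide
  have rp : PySem.Str.replace "09" "9" "6" = "06" := by decide
  have t0 : sqAt "06" 0 = "0" := by decide
  have t1 : sqAt "06" 1 = "6" := by decide
  simp only [stepA, pairCheck, s0, s1, i6, i9, rp, t0, t1, aug_contains,
    Bool.false_or, Bool.or_false, Bool.true_or, Bool.or_true, Bool.true_and, Bool.and_true,
    Bool.false_eq_true, if_false, if_true]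
  cases h1 : c1.contains "0" <;> cases h2 : c1.contains "6" <;> cases h3 : c1.contains "9" <;>
    cases h4 : c2.contains "0" <;> cases h5 : c2.contains "6" <;> cases h6 : c2.contains "9" <;>
      simp [h1, h2, h3, h4, h5, h6]

lemma step16 (c1 c2 : List String) :
    stepA "16" c1 c2 = pairCheck "16" (augFace c1) (augFace c2) := by
  have s0 : sqAt "16" 0 = "1" := by decide
  have s1 : sqAt "16" 1 = "6" := by decide
  have i6 : PySem.Str.isIn "6" "16" = true := by decide
  have rp : PySem.Str.replace "16" "6" "9" = "19" := by decide
  have t0 : sqAt "19" 0 = "1" := by decide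
  have t1 : sqAt "19" 1 = "9" := by decide
  simp only [stepA, pairCheck, s0, s1, i6, rp, t0, t1, aug_contains,
    Bool.false_or, Bool.or_false, Bool.true_or, Bool.or_true, Bool.true_and, Bool.and_true,
    Bool.false_eq_true, if_false, if_true]
  cases h1 : c1.contains "1" <;> cases h2 : c1.contains "6" <;> cases h3 : c1.contains "9" <;>
    cases h4 : c2.contains "1" <;> cases h5 : c2.contains "6" <;> cases h6 : c2.contains "9" <;>
      simp [h1, h2, h3, h4, h5, h6]

lemma step25 (c1 c2 : List String) :
    stepA "25" c1 c2 = pairCheck "25" (augFace c1) (augFace c2) := by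
  have s0 : sqAt "25" 0 = "2" := by decide
  have s1 : sqAt "25" 1 = "5" := by decide
  have i6 : PySem.Str.isIn "6" "25" = false := by decide
  have i9 : PySem.Str.isIn "9" "25" = false := by decide
  simp only [stepA, pairCheck, s0, s1, i6, i9, aug_contains]
  simp

lemma step36 (c1 c2 : List String) :
    stepA "36" c1 c2 = pairCheck "36" (augFace c1) (augFace c2) := by
  have s0 : sqAt "36" 0 = "3" := by decide
  have s1 : sqAt "36" 1 = "6" := by decide
  have i6 : PySem.Str.isIn "6" "36" = true := by decide
  have rp : PySem.Str.replace "36" "6" "9" = "39" := by decide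
  have t0 : sqAt "39" 0 = "3" := by decide
  have t1 : sqAt "39" 1 = "9" := by decide
  simp only [stepA, pairCheck, s0, s1, i6, rp, t0, t1, aug_contains,
    Bool.false_or, Bool.or_false, Bool.true_or, Bool.or_true, Bool.true_and, Bool.and_true,
    Bool.false_eq_true, if_false, if_true]
  cases h1 : c1.contains "3" <;> cases h2 : c1.contains "6" <;> cases h3 : c1.contains "9" <;>
    cases h4 : c2.contains "3" <;> cases h5 : c2.contains "6" <;> cases h6 : c2.contains "9" <;>
      simp [h1, h2, h3, h4, h5, h6]

lemma step49 (c1 c2 : List String) :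
    stepA "49" c1 c2 = pairCheck "49" (augFace c1) (augFace c2) := by
  have s0 : sqAt "49" 0 = "4" := by decide
  have s1 : sqAt "49" 1 = "9" := by decide
  have i6 : PySem.Str.isIn "6" "49" = false := by decide
  have i9 : PySem.Str.isIn "9" "49" = true := by decide
  have rp : PySem.Str.replace "49" "9" "6" = "46" := by decide
  have t0 : sqAt "46" 0 = "4" := by decide
  have t1 : sqAt "46" 1 = "6" := by decide
  simp only [stepA, pairCheck, s0, s1, i6, i9, rp, t0, t1, aug_contains,
    Bool.false_or, Bool.or_false, Bool.true_or, Bool.or_true, Bool.true_and, Bool.and_true,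
    Bool.false_eq_true, if_false, if_true]
  cases h1 : c1.contains "4" <;> cases h2 : c1.contains "6" <;> cases h3 : c1.contains "9" <;>
    cases h4 : c2.contains "4" <;> cases h5 : c2.contains "6" <;> cases h6 : c2.contains "9" <;>
      simp [h1, h2, h3, h4, h5, h6]

lemma step64 (c1 c2 : List String) :
    stepA "64" c1 c2 = pairCheck "64" (augFace c1) (augFace c2) := by
  have s0 : sqAt "64" 0 = "6" := by decide
  have s1 : sqAt "64" 1 = "4" := by decide
  have i6 : PySem.Str.isIn "6" "64" = true := by decide
  have rp : PySem.Str.replace "64" "6" "9" = "94" := by decide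
  have t0 : sqAt "94" 0 = "9" := by decide
  have t1 : sqAt "94" 1 = "4" := by decide
  simp only [stepA, pairCheck, s0, s1, i6, rp, t0, t1, aug_contains,
    Bool.false_or, Bool.or_false, Bool.true_or, Bool.or_true, Bool.true_and, Bool.and_true,
    Bool.false_eq_true, if_false, if_true]
  cases h1 : c1.contains "4" <;> cases h2 : c1.contains "6" <;> cases h3 : c1.contains "9" <;>
    cases h4 : c2.contains "4" <;> cases h5 : c2.contains "6" <;> cases h6 : c2.contains "9" <;>
      simp [h1, h2, h3, h4, h5, h6]

lemma step81 (c1 c2 : List String) :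
    stepA "81" c1 c2 = pairCheck "81" (augFace c1) (augFace c2) := by
  have s0 : sqAt "81" 0 = "8" := by decide
  have s1 : sqAt "81" 1 = "1" := by decide
  have i6 : PySem.Str.isIn "6" "81" = false := by decide
  have i9 : PySem.Str.isIn "9" "81" = false := by decide
  simp only [stepA, pairCheck, s0, s1, i6, i9, aug_contains]
  simp

-- ===== VERDICT (by name: the statement is the Claim_ definition above) =====
theorem can_display_spec : Claim_equal_can_display := by
  intro c1 c2 _
  unfold Spec_can_display
  show canDisplayLoop c1 c2 squareNumbers = squareNumbers.all (fun s => pairCheck s (augFace c1) (augFace c2))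
  simp only [squareNumbers]
  rw [loop_cons, loop_cons, loop_cons, loop_cons, loop_cons, loop_cons, loop_cons, loop_cons,
    loop_cons]
  simp only [step01, step04, step09, step16, step25, step36, step49, step64, step81,
    List.all_cons, List.all_nil, Bool.and_true, canDisplayLoop]
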